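-- pv_equiv track=rewrite | github.com/ozgurgulsoy/Pharmacy-Agent | src/document_processing/chunker.py | _get_overlap_lines
-- ===== SOURCE A (Python) =====
-- from typing import List, Dict, Any
--
-- def _get_overlap_lines(lines: List[str], overlap_chars: int) -> List[str]:
--     """Overlap için gerekli satırları döndürür."""
--     overlap_lines = []
--     total_chars = 0
--
--     for line in reversed(lines):
--         if total_chars >= overlap_chars:
--             break
--         overlap_lines.insert(0, line)
--         total_chars += len(line)
--
--     return overlap_lines
-- ===== SOURCE B (Python) =====
-- from typing import List
--
--
-- def _get_overlap_lines(lines: List[str], overlap_chars: int) -> List[str]: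
--     """Overlap icin gerekli satirlari dondurur (suffix cumulative-sum table)."""
--     if overlap_chars <= 0:
--         return []
--     # pass 1: cumulative lengths of trailing lines (last line first)
--     cums = []
--     s = 0
--     for ln in reversed(lines):
--         s += len(ln)
--         cums.append(s)
--     # pass 2: smallest count of trailing lines reaching the threshold
--     count = len(lines)
--     for i, c in enumerate(cums):
--         if c >= overlap_chars:
--             count = i + 1
--             break
--     return lines[len(lines) - count:]
-- ===== Notes on version B (the rewrite author's own statement) =====
-- stated objective: faster
-- what changed: Replaces A's single reversed loop with insert(0,...) and check-before-add break by a guard for non-positive thresholds, a cumulative suffix-length table, a separate search for the minimal trailing-line count, and one slice of the original list.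
import Mathlib
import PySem

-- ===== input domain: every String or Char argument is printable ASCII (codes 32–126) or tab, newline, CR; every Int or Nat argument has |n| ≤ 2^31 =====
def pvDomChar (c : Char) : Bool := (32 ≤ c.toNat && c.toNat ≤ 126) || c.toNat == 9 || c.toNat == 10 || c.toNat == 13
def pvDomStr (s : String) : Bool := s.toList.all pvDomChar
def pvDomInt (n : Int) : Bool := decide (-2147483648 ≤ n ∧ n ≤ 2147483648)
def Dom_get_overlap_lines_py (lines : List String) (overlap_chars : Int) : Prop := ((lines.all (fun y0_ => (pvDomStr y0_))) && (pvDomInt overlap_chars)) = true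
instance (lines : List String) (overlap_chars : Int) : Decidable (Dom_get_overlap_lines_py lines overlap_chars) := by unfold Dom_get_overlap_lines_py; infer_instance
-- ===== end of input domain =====

-- B replaces A's reversed loop with insert(0, …) by a cumulative suffix-length table,
-- a separate minimal-count search and one slice (objective: alternative decomposition).

-- ===== PORT A =====
-- the 'for line in reversed(lines)' loop: state = (total_chars, overlap_lines); break on total ≥ overlap
def pvGoA (overlap_chars : Int) : List String → Int → List String → List String
  | [], _, acc => acc
  | l :: rest, total, acc =>
    if total ≥ overlap_chars then acc
    else pvGoA overlap_chars rest (total + PySem.Str.len l) (l :: acc)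

def get_overlap_lines_py (lines : List String) (overlap_chars : Int) : List String :=
  pvGoA overlap_chars lines.reverse 0 []

-- ===== PORT B =====
-- pass 1 of Source B: cumulative lengths of the reversed lines (running sum s)
def pvCums : List String → Int → List Int
  | [], _ => []
  | l :: rest, s =>
    let s' := s + PySem.Str.len l
    s' :: pvCums rest s'

-- pass 2 of Source B: first index i with cums[i] ≥ overlap gives count i+1 (none: threshold unreached)
def pvFind (overlap_chars : Int) : List Int → Option Nat
  | [] => none
  | c :: rest => if c ≥ overlap_chars then some 1 else (pvFind overlap_chars rest).map (· + 1)

def get_overlap_lines_py_alt (lines : List String) (overlap_chars : Int) : List String :=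
  if overlap_chars ≤ 0 then []
  else
    let cums := pvCums lines.reverse 0
    let count := (pvFind overlap_chars cums).getD lines.length
    lines.drop (lines.length - count)

-- ===== PRECONDITION & SPEC =====
def Spec_get_overlap_lines_py (lines : List String) (overlap_chars : Int) (out : List String) : Prop := out = get_overlap_lines_py_alt lines overlap_chars
instance (lines : List String) (overlap_chars : Int) (out : List String) : Decidable (Spec_get_overlap_lines_py lines overlap_chars out) := by unfold Spec_get_overlap_lines_py; infer_instance

-- ===== CLAIM (what is proved, stated in full; the proofs are below) =====
def Claim_equal_get_overlap_lines_py : Prop := ∀ (lines : List String) (overlap_chars : Int), Dom_get_overlap_lines_py lines overlap_chars → Spec_get_overlap_lines_py lines overlap_chars (get_overlap_lines_py lines overlap_chars)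

-- ===== LEMMAS AND PROOFS =====

theorem pvGoA_acc (ov : Int) (rev : List String) (total : Int) (acc : List String) :
    pvGoA ov rev total acc = pvGoA ov rev total [] ++ acc := by
  induction rev generalizing total acc with
  | nil => simp [pvGoA]
  | cons l rest ih =>
    simp only [pvGoA]
    split
    · simp
    · rw [ih (total + PySem.Str.len l) (l :: acc), ih (total + PySem.Str.len l) [l]]
      simp

-- main invariant: A's loop on the reversed list produces the reverse of the first
-- 'count' reversed lines, where count is B's minimal-count search on B's table.
theorem pvMain (ov : Int) (rev : List String) (total : Int) (h : total < ov) :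
    pvGoA ov rev total [] =
      (rev.take ((pvFind ov (pvCums rev total)).getD rev.length)).reverse := by
  induction rev generalizing total with
  | nil => simp [pvGoA, pvCums, pvFind]
  | cons l rest ih =>
    simp only [pvGoA, pvCums, pvFind, if_neg (not_le.mpr h)]
    by_cases hc : total + PySem.Str.len l ≥ ov
    · rw [pvGoA_acc]
      have hz : pvGoA ov rest (total + PySem.Str.len l) [] = [] := by
        cases rest with
        | nil => rfl
        | cons b bs => simp only [pvGoA]; rw [if_pos hc]
      rw [hz, if_pos hc]
      simp
    · rw [pvGoA_acc, ih (total + PySem.Str.len l) (not_le.mp hc)]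
      rw [if_neg hc]
      cases hf : pvFind ov (pvCums rest (total + PySem.Str.len l)) with
      | none => simp
      | some k => simp [List.take_succ_cons]

theorem drop_eq_take_reverse (l : List String) (k : Nat) :
    l.drop (l.length - k) = (l.reverse.take k).reverse := by
  rw [List.take_reverse, List.reverse_reverse]

-- ===== VERDICT (by name: the statement is the Claim_ definition above) =====
theorem get_overlap_lines_py_spec : Claim_equal_get_overlap_lines_py := by
  intro lines ov _
  unfold Spec_get_overlap_lines_py get_overlap_lines_py get_overlap_lines_py_alt
  by_cases h : ov ≤ 0
  · rw [if_pos h]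
    cases hl : lines.reverse with
    | nil => rfl
    | cons a as => simp only [pvGoA]; rw [if_pos h]
  · rw [if_neg h]
    have hlt : (0 : Int) < ov := lt_of_not_ge h
    rw [pvMain ov lines.reverse 0 hlt, drop_eq_take_reverse lines]
    simp
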